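-- pv_equiv track=rewrite | github.com/UndergroundDetection/MICEMD | src/MicEMD/classification/Ensemble.py | contingency_table
-- ===== SOURCE A (Python) =====
-- def contingency_table(y_pred1, y_pred2):
--     """计算两个分类器的列联表
--     Parameters
--     ----------
--     y_pred1：list 第一个分类器的预测结果
--     y_pred2：list 第二个分类器的预测结果
--     Returns：list 列联表
--     -------
--
--     """
--     dct = {'00': 0, '01': 0, '10': 0, '11': 0}
--     for i in range(len(y_pred1)):
--         if y_pred1[i] == 0:
--             if y_pred2[i] == y_pred1[i]:
--                 dct['00'] += 1
--             else:
--                 dct['01'] += 1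
--         else:
--             if y_pred2[i] == y_pred1[i]:
--                 dct['11'] = dct.get('11', 0) + 1
--             else:
--                 dct['10'] = dct.get('10', 0) + 1
--     return [dct['00'], dct['01'], dct['10'], dct['11']]
-- ===== SOURCE B (Python) =====
-- def contingency_table(y_pred1, y_pred2):
--     n = len(y_pred1)
--     c0 = sum(1 for i in range(n) if y_pred1[i] == 0 and y_pred2[i] == 0)
--     c1 = sum(1 for i in range(n) if y_pred1[i] == 0 and y_pred2[i] != 0)
--     c2 = sum(1 for i in range(n) if y_pred1[i] != 0 and y_pred2[i] != y_pred1[i])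
--     c3 = sum(1 for i in range(n) if y_pred1[i] != 0 and y_pred2[i] == y_pred1[i])
--     return [c0, c1, c2, c3]
-- ===== Notes on version B (the rewrite author's own statement) =====
-- stated objective: alternative
-- what changed: B replaces A's single branching pass that mutates a string-keyed dict with four independent filtered counts over the index range, one per contingency cell, returned directly as a list.
import Mathlib
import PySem

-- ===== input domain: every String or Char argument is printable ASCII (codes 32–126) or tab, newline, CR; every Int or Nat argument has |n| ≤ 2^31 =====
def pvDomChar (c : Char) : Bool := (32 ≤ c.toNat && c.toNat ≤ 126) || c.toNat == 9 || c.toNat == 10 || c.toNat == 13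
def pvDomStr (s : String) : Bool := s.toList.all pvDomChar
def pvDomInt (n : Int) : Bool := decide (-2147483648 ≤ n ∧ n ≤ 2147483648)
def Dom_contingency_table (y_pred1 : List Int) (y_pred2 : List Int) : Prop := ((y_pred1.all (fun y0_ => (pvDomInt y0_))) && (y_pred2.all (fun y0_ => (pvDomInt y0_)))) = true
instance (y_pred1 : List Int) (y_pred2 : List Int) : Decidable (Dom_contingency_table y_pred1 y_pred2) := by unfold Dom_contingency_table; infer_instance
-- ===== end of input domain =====

-- B computes each of the four contingency cells as an independent filtered count over the
-- index range instead of A's single branching pass mutating a string-keyed dict (objective: alternative).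

-- ===== PORT A =====
-- A-side helper: the body of A's for-loop (one literal step of the branching pass)
def ctStep (y1 y2 : List Int) (d : PySem.Dict String Int) (i : Int) : PySem.Dict String Int :=
  if PySem.List.pyGetD y1 i 0 = 0 then
    if PySem.List.pyGetD y2 i 0 = PySem.List.pyGetD y1 i 0 then
      d.insert "00" (d.getD "00" 0 + 1)
    else
      d.insert "01" (d.getD "01" 0 + 1)
  else
    if PySem.List.pyGetD y2 i 0 = PySem.List.pyGetD y1 i 0 then
      d.insert "11" (d.getD "11" 0 + 1)
    else
      d.insert "10" (d.getD "10" 0 + 1)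

def contingency_table (y_pred1 : List Int) (y_pred2 : List Int) : List Int :=
  let dct : PySem.Dict String Int :=
    PySem.Dict.ofList [("00", 0), ("01", 0), ("10", 0), ("11", 0)]
  let dct := (PySem.List.pyRange 0 (y_pred1.length : Int) 1).foldl (ctStep y_pred1 y_pred2) dct
  [dct.getD "00" 0, dct.getD "01" 0, dct.getD "10" 0, dct.getD "11" 0]

-- ===== PORT B =====
def contingency_table_alt (y_pred1 : List Int) (y_pred2 : List Int) : List Int :=
  let n : Int := (y_pred1.length : Int)
  let c0 : Int := ((PySem.List.pyRange 0 n 1).countP (fun i =>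
    PySem.List.pyGetD y_pred1 i 0 == 0 && PySem.List.pyGetD y_pred2 i 0 == 0) : Int)
  let c1 : Int := ((PySem.List.pyRange 0 n 1).countP (fun i =>
    PySem.List.pyGetD y_pred1 i 0 == 0 && PySem.List.pyGetD y_pred2 i 0 != 0) : Int)
  let c2 : Int := ((PySem.List.pyRange 0 n 1).countP (fun i =>
    PySem.List.pyGetD y_pred1 i 0 != 0 && PySem.List.pyGetD y_pred2 i 0 != PySem.List.pyGetD y_pred1 i 0) : Int)
  let c3 : Int := ((PySem.List.pyRange 0 n 1).countP (fun i =>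
    PySem.List.pyGetD y_pred1 i 0 != 0 && PySem.List.pyGetD y_pred2 i 0 == PySem.List.pyGetD y_pred1 i 0) : Int)
  [c0, c1, c2, c3]

-- ===== PRECONDITION & SPEC =====
-- A indexes y_pred2[i] for every i < len(y_pred1), so it raises IndexError exactly when
-- y_pred2 is shorter than y_pred1; Pre_ excludes exactly those inputs.
def Pre_contingency_table (y_pred1 : List Int) (y_pred2 : List Int) : Prop :=
  y_pred1.length ≤ y_pred2.length
instance (y_pred1 : List Int) (y_pred2 : List Int) : Decidable (Pre_contingency_table y_pred1 y_pred2) := by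
  unfold Pre_contingency_table; infer_instance
def pvWitness_contingency_table : List Int × List Int := ([0, 1, 2, 1], [0, 1, 0, 2])

def Spec_contingency_table (y_pred1 : List Int) (y_pred2 : List Int) (out : List Int) : Prop := out = contingency_table_alt y_pred1 y_pred2
instance (y_pred1 : List Int) (y_pred2 : List Int) (out : List Int) : Decidable (Spec_contingency_table y_pred1 y_pred2 out) := by unfold Spec_contingency_table; infer_instance

-- ===== CLAIM (what is proved, stated in full; the proofs are below) =====
def Claim_equal_contingency_table : Prop := ∀ (y_pred1 : List Int) (y_pred2 : List Int), Dom_contingency_table y_pred1 y_pred2 → Pre_contingency_table y_pred1 y_pred2 → Spec_contingency_table y_pred1 y_pred2 (contingency_table y_pred1 y_pred2)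

-- ===== LEMMAS AND PROOFS =====

-- loop invariant: each of the four dict entries equals the corresponding filtered count
theorem ct_fold_invariant (y1 y2 : List Int) (n : Nat) :
    (((PySem.List.pyRange 0 (n : Int) 1).foldl (ctStep y1 y2)
      (PySem.Dict.ofList [("00", 0), ("01", 0), ("10", 0), ("11", 0)])).getD "00" 0
      = ((PySem.List.pyRange 0 (n : Int) 1).countP (fun i =>
          PySem.List.pyGetD y1 i 0 == 0 && PySem.List.pyGetD y2 i 0 == 0) : Int))
    ∧ (((PySem.List.pyRange 0 (n : Int) 1).foldl (ctStep y1 y2)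
      (PySem.Dict.ofList [("00", 0), ("01", 0), ("10", 0), ("11", 0)])).getD "01" 0
      = ((PySem.List.pyRange 0 (n : Int) 1).countP (fun i =>
          PySem.List.pyGetD y1 i 0 == 0 && PySem.List.pyGetD y2 i 0 != 0) : Int))
    ∧ (((PySem.List.pyRange 0 (n : Int) 1).foldl (ctStep y1 y2)
      (PySem.Dict.ofList [("00", 0), ("01", 0), ("10", 0), ("11", 0)])).getD "10" 0
      = ((PySem.List.pyRange 0 (n : Int) 1).countP (fun i =>
          PySem.List.pyGetD y1 i 0 != 0 && PySem.List.pyGetD y2 i 0 != PySem.List.pyGetD y1 i 0) : Int))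
    ∧ (((PySem.List.pyRange 0 (n : Int) 1).foldl (ctStep y1 y2)
      (PySem.Dict.ofList [("00", 0), ("01", 0), ("10", 0), ("11", 0)])).getD "11" 0
      = ((PySem.List.pyRange 0 (n : Int) 1).countP (fun i =>
          PySem.List.pyGetD y1 i 0 != 0 && PySem.List.pyGetD y2 i 0 == PySem.List.pyGetD y1 i 0) : Int)) := by
  induction n with
  | zero =>
    refine ⟨?_, ?_, ?_, ?_⟩ <;> · simp; decide
  | succ m ih =>
    obtain ⟨ih00, ih01, ih10, ih11⟩ := ih
    have hsplit : PySem.List.pyRange 0 ((m + 1 : Nat) : Int) 1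
        = PySem.List.pyRange 0 (m : Int) 1 ++ [(m : Int)] := by
      push_cast
      exact PySem.List.pyRange_one_succ_right (by positivity)
    rw [hsplit]
    simp only [List.foldl_append, List.foldl_cons, List.foldl_nil, List.countP_append,
      List.countP_cons, List.countP_nil]
    set d := (PySem.List.pyRange 0 (m : Int) 1).foldl (ctStep y1 y2)
      (PySem.Dict.ofList [("00", 0), ("01", 0), ("10", 0), ("11", 0)]) with hd
    unfold ctStep
    by_cases h1 : PySem.List.pyGetD y1 (m : Int) 0 = 0 <;>
      by_cases h2 : PySem.List.pyGetD y2 (m : Int) 0 = PySem.List.pyGetD y1 (m : Int) 0 <;>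
      [skip; rw [h1] at h2; skip; skip] <;>
      (try simp only [PySem.List.pyGetD_natCast, List.getD_eq_getElem?_getD] at h1 h2) <;>
      refine ⟨?_, ?_, ?_, ?_⟩ <;>
      rw [hd] at ih00 ih01 ih10 ih11 ⊢ <;>
      simp [PySem.Dict.getD_insert, ih00, ih01, ih10, ih11, h1, h2, bne]

-- ===== VERDICT (by name: the statement is the Claim_ definition above) =====
theorem contingency_table_spec : Claim_equal_contingency_table := by
  intro y1 y2 _ _
  obtain ⟨h00, h01, h10, h11⟩ := ct_fold_invariant y1 y2 y1.length
  unfold Spec_contingency_table contingency_table contingency_table_alt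
  simp only [h00, h01, h10, h11]
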